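-- pv_equiv track=rewrite | github.com/333-max333/ModemTool | 天翼root密码计算器2.py | generate_a1
-- ===== SOURCE A (Python) =====
-- def generate_a1(hex_str):
--     cts = [
--         'QbNUTaMecPWVSKdCgXIJRrsfYXwyqpvnDHWzQuPmAGtAxRTphBcwBnNkjbFmvVMqaFkEutSrDCxsCKjBzEyDEUJTZfHZghMHYFdeASGNaUgFtdbYRkshJHkFNXMcKdfw',
--         'NXMcKdfwRkshJHkFaUgFtdbYYFdeASGNZfHZghMHzEyDEUJTDCxsCKjBaFkEutSrjbFmvVMqhBcwBnNkAGtAxRTpDHWzQuPmYXwyqpvngXIJRrsfcPWVSKdCQbNUTaMe',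
--         'eMaTUNbQCdKSVWPcfsrRJIXgnvpqywXYmPuQzWHDpTRxAtGAkNnBwcBhqMVvmFbjrStuEkFaBjKCsxCDTJUEDyEzHMhgZHfZNGSAedFYYbdtFgUaFkHJhskRwfdKcMXN',
--         'CbntTaMGFPWTSkdCtXIYRrsfaXyyqpvRbHWAJuPSAGtacRTpVKcmBnNevbFMvSMPDFkEuRSDXCssCKjszEyDEUJCZfckghBHYFseASaNaUgFPfbYRLSubTkFKXMcKdfH',
--         'gXIJRrsfNXMcKdfwYXwZqpvnQuPmDHWzAGtQxRTpjbFmvVMqDCxsjBCKzEyDEUJTHbCwBnIkZfHZghMHYASGFdeNcPWVSKdCaUgFtdbYRkshJHkF'+'QbNUTaMeaFkLutSr'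
--     ]
--     hex_clean = ''.join(c for c in hex_str.upper() if c in '0123456789ABCDEF')
--     if len(hex_clean) < 12: return "MAC错误"
--     v19 = [ord(c) for c in reversed(hex_clean[-8:])]
--     v10 = next(((c-48|j) for j,c in enumerate(v19) if 49<=c<=57), 5)
--     results = [[] for _ in range(len(cts))]
--     for k in range(len(v19)):
--         v15 = v19[k] & v19[7-k] if k <4 else v19[k] | v19[k-4]
--         v16 = v15 + v10
--         if v16 > 127: v16, v10 = k, k
--         for i in range(len(cts)): results[i].append(cts[i][v16])
--         v10 += max(k, 1)
--
--     # 添加注释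
--     annotated_results = [
--         ''.join(results[0]) + "  # 电信版",
--         ''.join(results[1]) + "  # 电信版",
--         ''.join(results[2]) + "  # 特艺光猫的",
--         ''.join(results[3]) + "  # 联通的博通版",
--         ''.join(results[4]) + "  # 海思版"
--     ]
--
--     # 每个结果都独占一行，前面加上16个空格
--     result_line1 = "                " + annotated_results[0]
--     result_line2 = "                " + annotated_results[1]
--     result_line3 = "                " + annotated_results[2]
--     result_line4 = "                " + annotated_results[3]
--     result_line5 = "                " + annotated_results[4]
--
--     return '\n'.join([result_line1, result_line2, result_line3, result_line4, result_line5])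
-- ===== SOURCE B (Python) =====
-- def _seed(chars, j):
--     # first char in '1'..'9' (scanning left to right) gives int(c) | position; default 5
--     if not chars:
--         return 5
--     c = chars[0]
--     return (int(c) | j) if '1' <= c <= '9' else _seed(chars[1:], j + 1)
--
--
-- def _indices(v15s, v10, k):
--     # consume the precomputed v15 values, threading the carry; built front-to-back
--     if not v15s:
--         return []
--     v16 = v15s[0] + v10
--     if v16 > 127:
--         return [k] + _indices(v15s[1:], k + max(k, 1), k + 1)
--     return [v16] + _indices(v15s[1:], v10 + max(k, 1), k + 1)
--
--
-- def generate_a1(hex_str):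
--     cts = [
--         'QbNUTaMecPWVSKdCgXIJRrsfYXwyqpvnDHWzQuPmAGtAxRTphBcwBnNkjbFmvVMqaFkEutSrDCxsCKjBzEyDEUJTZfHZghMHYFdeASGNaUgFtdbYRkshJHkFNXMcKdfw',
--         'NXMcKdfwRkshJHkFaUgFtdbYYFdeASGNZfHZghMHzEyDEUJTDCxsCKjBaFkEutSrjbFmvVMqhBcwBnNkAGtAxRTpDHWzQuPmYXwyqpvngXIJRrsfcPWVSKdCQbNUTaMe',
--         'eMaTUNbQCdKSVWPcfsrRJIXgnvpqywXYmPuQzWHDpTRxAtGAkNnBwcBhqMVvmFbjrStuEkFaBjKCsxCDTJUEDyEzHMhgZHfZNGSAedFYYbdtFgUaFkHJhskRwfdKcMXN',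
--         'CbntTaMGFPWTSkdCtXIYRrsfaXyyqpvRbHWAJuPSAGtacRTpVKcmBnNevbFMvSMPDFkEuRSDXCssCKjszEyDEUJCZfckghBHYFseASaNaUgFPfbYRLSubTkFKXMcKdfH',
--         'gXIJRrsfNXMcKdfwYXwZqpvnQuPmDHWzAGtQxRTpjbFmvVMqDCxsjBCKzEyDEUJTHbCwBnIkZfHZghMHYASGFdeNcPWVSKdCaUgFtdbYRkshJHkFQbNUTaMeaFkLutSr'
--     ]
--     notes = ["  # 电信版", "  # 电信版", "  # 特艺光猫的", "  # 联通的博通版", "  # 海思版"]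
--     hex_clean = ''.join(c for c in map(str.upper, hex_str) if c in '0123456789ABCDEF')
--     if len(hex_clean) < 12:
--         return "MAC错误"
--     rev = hex_clean[::-1][:8]
--     lo, hi = rev[:4], rev[4:]
--     # pair the mirrored halves once: v15[k] = rev[k]&rev[7-k] (k<4), rev[k]|rev[k-4] (k>=4)
--     v15s = [ord(a) & ord(b) for a, b in zip(lo, hi[::-1])] + \
--            [ord(a) | ord(b) for a, b in zip(hi, lo)]
--     idx = _indices(v15s, _seed(rev, 0), 0)
--     return '\n'.join('                ' + ''.join(t[i] for i in idx) + note
--                      for t, note in zip(cts, notes))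
-- ===== Notes on version B (the rewrite author's own statement) =====
-- stated objective: alternative
-- what changed: B replaces A's indexed loop over five parallel result lists by a different pipeline: it pairs the mirrored halves of the reversed tail once with zips to precompute all v15 values (no index arithmetic or k<4 branch in the loop), derives the seed and the shared index sequence by structural recursion built front-to-back, and then renders each of the five annotated lines independently from that one sequence.
import Mathlib
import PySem

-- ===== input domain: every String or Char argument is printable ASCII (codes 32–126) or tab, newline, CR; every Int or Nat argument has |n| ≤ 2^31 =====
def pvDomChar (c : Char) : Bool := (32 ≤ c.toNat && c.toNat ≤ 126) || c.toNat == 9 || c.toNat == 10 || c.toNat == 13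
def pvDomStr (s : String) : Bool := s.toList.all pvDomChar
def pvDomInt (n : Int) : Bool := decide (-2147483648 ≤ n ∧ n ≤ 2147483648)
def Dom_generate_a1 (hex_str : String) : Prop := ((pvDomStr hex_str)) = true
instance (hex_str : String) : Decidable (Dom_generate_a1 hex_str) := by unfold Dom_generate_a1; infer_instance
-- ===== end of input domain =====

-- B re-derives the index sequence from zipped mirrored halves of the reversed tail, by
-- recursion instead of A's indexed loop over five parallel lists; same return value, no speed claim.

-- shared literal data (the five tables and annotations appear verbatim in both Pythons)
def pvCts : List (List Char) :=
  [ "QbNUTaMecPWVSKdCgXIJRrsfYXwyqpvnDHWzQuPmAGtAxRTphBcwBnNkjbFmvVMqaFkEutSrDCxsCKjBzEyDEUJTZfHZghMHYFdeASGNaUgFtdbYRkshJHkFNXMcKdfw".toList,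
    "NXMcKdfwRkshJHkFaUgFtdbYYFdeASGNZfHZghMHzEyDEUJTDCxsCKjBaFkEutSrjbFmvVMqhBcwBnNkAGtAxRTpDHWzQuPmYXwyqpvngXIJRrsfcPWVSKdCQbNUTaMe".toList,
    "eMaTUNbQCdKSVWPcfsrRJIXgnvpqywXYmPuQzWHDpTRxAtGAkNnBwcBhqMVvmFbjrStuEkFaBjKCsxCDTJUEDyEzHMhgZHfZNGSAedFYYbdtFgUaFkHJhskRwfdKcMXN".toList,
    "CbntTaMGFPWTSkdCtXIYRrsfaXyyqpvRbHWAJuPSAGtacRTpVKcmBnNevbFMvSMPDFkEuRSDXCssCKjszEyDEUJCZfckghBHYFseASaNaUgFPfbYRLSubTkFKXMcKdfH".toList,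
    "gXIJRrsfNXMcKdfwYXwZqpvnQuPmDHWzAGtQxRTpjbFmvVMqDCxsjBCKzEyDEUJTHbCwBnIkZfHZghMHYASGFdeNcPWVSKdCaUgFtdbYRkshJHkF".toList
      ++ "QbNUTaMeaFkLutSr".toList ]

def pvHexDigits : List Char := "0123456789ABCDEF".toList

-- cts[i][v16]: Python indexing; the computed index is always 0..127 and the tables have
-- 128 chars, so the Option default is never the returned value.
def pvAt (t : List Char) (i : Int) : Char := (PySem.List.pyGet? t i).getD ' '

-- ===== PORT A =====
-- hex_clean = ''.join(c for c in hex_str.upper() if c in '0123456789ABCDEF')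
def pvHexClean (hex_str : String) : List Char :=
  ((PySem.Str.upper hex_str).toList).filter (fun c => pvHexDigits.contains c)

-- v19 = [ord(c) for c in reversed(hex_clean[-8:])]
def pvCodes (hex_clean : List Char) : List Int :=
  ((PySem.List.slice hex_clean (some (-8)) none).reverse).map (fun c => (c.toNat : Int))

-- v10 = next(((c-48|j) for j,c in enumerate(v19) if 49<=c<=57), 5)
def pvInitV10A (v19 : List Int) : Int :=
  (((PySem.List.enumerate v19 0).find? (fun jc => 49 ≤ jc.2 && jc.2 ≤ 57)).map
    (fun jc => PySem.Int.bor (jc.2 - 48) jc.1)).getD 5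

-- v15 = v19[k] & v19[7-k] if k < 4 else v19[k] | v19[k-4]
def pvV15A (v19 : List Int) (k : Int) : Int :=
  if k < 4 then
    PySem.Int.band ((PySem.List.pyGet? v19 k).getD 0) ((PySem.List.pyGet? v19 (7 - k)).getD 0)
  else
    PySem.Int.bor ((PySem.List.pyGet? v19 k).getD 0) ((PySem.List.pyGet? v19 (k - 4)).getD 0)

-- one iteration of A's main loop: state = (v10, the five growing result lists)
def pvStepA (cts : List (List Char)) (f : Int → Int) (st : Int × List (List Char)) (k : Int) :
    Int × List (List Char) :=
  let v16 := f k + st.1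
  let p := if v16 > 127 then (k, k) else (v16, st.1)
  (p.2 + max k 1, List.zipWith (fun r t => r ++ [pvAt t p.1]) st.2 cts)

def generate_a1 (hex_str : String) : String :=
  let hex_clean := pvHexClean hex_str
  if hex_clean.length < 12 then "MAC错误"
  else
    let v19 := pvCodes hex_clean
    let v10 := pvInitV10A v19
    let results :=
      ((PySem.List.pyRange 0 (v19.length : Int) 1).foldl (pvStepA pvCts (pvV15A v19))
        (v10, List.replicate pvCts.length [])).2
    let annotated :=
      [ results.getD 0 [] ++ "  # 电信版".toList,
        results.getD 1 [] ++ "  # 电信版".toList,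
        results.getD 2 [] ++ "  # 特艺光猫的".toList,
        results.getD 3 [] ++ "  # 联通的博通版".toList,
        results.getD 4 [] ++ "  # 海思版".toList ]
    String.ofList (PySem.Chars.join "\n".toList
      [ "                ".toList ++ annotated.getD 0 [],
        "                ".toList ++ annotated.getD 1 [],
        "                ".toList ++ annotated.getD 2 [],
        "                ".toList ++ annotated.getD 3 [],
        "                ".toList ++ annotated.getD 4 [] ])

-- ===== PORT B =====
-- _seed: first char in '1'..'9' gives int(c) | position, default 5 (recursion over chars)
def pvSeed : List Char → Int → Int
  | [], _ => 5
  | c :: rest, j =>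
      if '1' ≤ c ∧ c ≤ '9' then PySem.Int.bor ((PySem.Int.ofChars? [c]).getD 0) j
      else pvSeed rest (j + 1)

-- _indices: consume precomputed v15 values, threading the carry, building front-to-back
def pvIndices : List Int → Int → Int → List Int
  | [], _, _ => []
  | v :: rest, v10, k =>
      let v16 := v + v10
      if v16 > 127 then k :: pvIndices rest (k + max k 1) (k + 1)
      else v16 :: pvIndices rest (v10 + max k 1) (k + 1)

def pvNotes : List (List Char) :=
  [ "  # 电信版".toList, "  # 电信版".toList, "  # 特艺光猫的".toList,
    "  # 联通的博通版".toList, "  # 海思版".toList ]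

-- ''.join(c for c in map(str.upper, hex_str) if c in '0123456789ABCDEF')
-- (str.upper of a single char = PySem.Chars.upperChar, exact on the ASCII domain)
def pvHexCleanB (hex_str : String) : List Char :=
  (hex_str.toList.map PySem.Chars.upperChar).filter (fun c => pvHexDigits.contains c)

def generate_a1_alt (hex_str : String) : String :=
  let hex_clean := pvHexCleanB hex_str
  if hex_clean.length < 12 then "MAC错误"
  else
    -- rev = hex_clean[::-1][:8]
    let rev := PySem.List.slice ((PySem.List.slice? hex_clean none none (-1)).getD []) none (some 8)
    let lo := PySem.List.slice rev none (some 4)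
    let hi := PySem.List.slice rev (some 4) none
    let v15s :=
      ((lo.zip ((PySem.List.slice? hi none none (-1)).getD [])).map
          (fun ab => PySem.Int.band ((ab.1.toNat : Int)) ((ab.2.toNat : Int))))
        ++ ((hi.zip lo).map (fun ab => PySem.Int.bor ((ab.1.toNat : Int)) ((ab.2.toNat : Int))))
    let idx := pvIndices v15s (pvSeed rev 0) 0
    String.ofList (PySem.Chars.join "\n".toList
      ((pvCts.zip pvNotes).map (fun tn =>
        "                ".toList ++ idx.map (pvAt tn.1) ++ tn.2)))

-- ===== PRECONDITION & SPEC =====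
def Spec_generate_a1 (hex_str : String) (out : String) : Prop := out = generate_a1_alt hex_str
instance (hex_str : String) (out : String) : Decidable (Spec_generate_a1 hex_str out) := by unfold Spec_generate_a1; infer_instance

-- ===== CLAIM =====
def Claim_equal_generate_a1 : Prop := ∀ (hex_str : String), Dom_generate_a1 hex_str → Spec_generate_a1 hex_str (generate_a1 hex_str)

-- ===== LEMMAS AND PROOFS =====

theorem pv_hexclean_eq (s : String) : pvHexCleanB s = pvHexClean s := by
  simp [pvHexCleanB, pvHexClean, PySem.Chars.upper]

-- two chars with the same code point are equal
theorem pv_char_eq_of_toNat {c : Char} (d : Char) (h : c.toNat = d.toNat) : c = d := by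
  have h1 := Char.ofNat_toNat c
  rw [h] at h1
  rw [← h1, Char.ofNat_toNat]

-- Char order vs code-point order on the digit bounds
theorem pv_digit_iff (c : Char) : ('1' ≤ c ∧ c ≤ '9') ↔ (49 ≤ c.toNat ∧ c.toNat ≤ 57) := by
  have h1 : ('1' ≤ c) ↔ 49 ≤ c.toNat := by rw [Char.le_def, UInt32.le_iff_toNat_le]; rfl
  have h2 : (c ≤ '9') ↔ c.toNat ≤ 57 := by rw [Char.le_def, UInt32.le_iff_toNat_le]; rfl
  rw [h1, h2]

-- int(c) for a decimal digit char
theorem pv_int_of_digit (c : Char) (h : '1' ≤ c ∧ c ≤ '9') :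
    (PySem.Int.ofChars? [c]).getD 0 = ((c.toNat : Int)) - 48 := by
  obtain ⟨h1, h2⟩ := h
  rw [Char.le_def, UInt32.le_iff_toNat_le] at h1 h2
  have h1' : 49 ≤ c.toNat := h1
  have h2' : c.toNat ≤ 57 := h2
  have hv : c.toNat = 49 ∨ c.toNat = 50 ∨ c.toNat = 51 ∨ c.toNat = 52 ∨ c.toNat = 53 ∨
      c.toNat = 54 ∨ c.toNat = 55 ∨ c.toNat = 56 ∨ c.toNat = 57 := by omega
  rcases hv with h|h|h|h|h|h|h|h|h
  · rw [pv_char_eq_of_toNat '1' h]; decide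
  · rw [pv_char_eq_of_toNat '2' h]; decide
  · rw [pv_char_eq_of_toNat '3' h]; decide
  · rw [pv_char_eq_of_toNat '4' h]; decide
  · rw [pv_char_eq_of_toNat '5' h]; decide
  · rw [pv_char_eq_of_toNat '6' h]; decide
  · rw [pv_char_eq_of_toNat '7' h]; decide
  · rw [pv_char_eq_of_toNat '8' h]; decide
  · rw [pv_char_eq_of_toNat '9' h]; decide

-- B's recursive seed computes A's next(..., 5) over enumerate of the ord list
theorem pv_seed_eq (l : List Char) (j : Int) :
    pvSeed l j
      = ((((PySem.List.enumerate (l.map (fun c => (c.toNat : Int))) j).find?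
            (fun jc => 49 ≤ jc.2 && jc.2 ≤ 57)).map
          (fun jc => PySem.Int.bor (jc.2 - 48) jc.1)).getD 5) := by
  induction l generalizing j with
  | nil => simp [pvSeed, PySem.List.enumerate_nil]
  | cons c rest ih =>
      rw [List.map_cons, PySem.List.enumerate_cons]
      by_cases h : '1' ≤ c ∧ c ≤ '9'
      · have hb := (pv_digit_iff c).mp h
        simp [pvSeed, h, List.find?, hb.1, hb.2, pv_int_of_digit c h]
      · have hb : ¬ (49 ≤ c.toNat ∧ c.toNat ≤ 57) := fun hx => h ((pv_digit_iff c).mpr hx)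
        have hb' : (decide (49 ≤ c.toNat) && decide (c.toNat ≤ 57)) = false := by
          rcases not_and_or.mp hb with h' | h' <;> simp [h']
        simp [pvSeed, h, List.find?, hb', ih]

-- appending one character to each of the five result lists = extending the index sequence
theorem pvZipWith_append (cts : List (List Char)) (acc : List Int) (i : Int) :
    List.zipWith (fun r t => r ++ [pvAt t i]) (cts.map (fun t => acc.map (pvAt t))) cts
      = cts.map (fun t => (acc ++ [i]).map (pvAt t)) := by
  induction cts with
  | nil => rfl
  | cons t ts ih => simp [ih]

-- index-only shape of one main-loop iteration
def pvStepIdx (f : Int → Int) (st : Int × List Int) (k : Int) : Int × List Int :=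
  let v16 := f k + st.1
  if v16 > 127 then (k + max k 1, st.2 ++ [k]) else (st.1 + max k 1, st.2 ++ [v16])

-- main loop invariant: A's five result lists are the index sequence mapped over the tables
theorem pvFold_inv (cts : List (List Char)) (f : Int → Int) (ks : List Int)
    (v10 : Int) (acc : List Int) :
    ks.foldl (pvStepA cts f) (v10, cts.map (fun t => acc.map (pvAt t)))
      = ((ks.foldl (pvStepIdx f) (v10, acc)).1,
          cts.map (fun t => ((ks.foldl (pvStepIdx f) (v10, acc)).2).map (pvAt t))) := by
  induction ks generalizing v10 acc with
  | nil => simp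
  | cons k ks ih =>
      simp only [List.foldl_cons]
      have hstep : pvStepA cts f (v10, cts.map (fun t => acc.map (pvAt t))) k
          = ((pvStepIdx f (v10, acc) k).1,
              cts.map (fun t => ((pvStepIdx f (v10, acc) k).2).map (pvAt t))) := by
        unfold pvStepA pvStepIdx
        by_cases h : f k + v10 > 127 <;> simp [h, pvZipWith_append]
      rw [hstep]
      exact ih _ _

-- the indexed fold over range(k0, k0+n) equals B's recursion over the mapped v15 list
theorem pv_fold_rec (f : Int → Int) (n : Nat) :
    ∀ (k0 v10 : Int) (acc : List Int),
    ((PySem.List.pyRange k0 (k0 + n) 1).foldl (pvStepIdx f) (v10, acc)).2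
      = acc ++ pvIndices ((PySem.List.pyRange k0 (k0 + n) 1).map f) v10 k0 := by
  induction n with
  | zero =>
      intro k0 v10 acc
      rw [PySem.List.pyRange_one_eq_nil (by omega : (k0:Int) + ((0:Nat):Int) ≤ k0)]
      simp [pvIndices]
  | succ n ih =>
      intro k0 v10 acc
      have hc : PySem.List.pyRange k0 (k0 + (n+1 : Nat)) 1
          = k0 :: PySem.List.pyRange (k0+1) (k0 + (n+1:Nat)) 1 :=
        PySem.List.pyRange_one_cons (by push_cast; omega)
      have hrest : (k0:Int) + ((n+1:Nat) : Int) = (k0 + 1) + (n:Nat) := by push_cast; omega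
      rw [hc, List.map_cons, List.foldl_cons, hrest]
      by_cases h : f k0 + v10 > 127
      · have h1 : pvStepIdx f (v10, acc) k0 = (k0 + max k0 1, acc ++ [k0]) := by
          simp [pvStepIdx, h]
        rw [h1, ih, pvIndices]
        simp [h]
      · have h1 : pvStepIdx f (v10, acc) k0 = (v10 + max k0 1, acc ++ [f k0 + v10]) := by
          simp [pvStepIdx, h]
        rw [h1, ih, pvIndices]
        simp [h]

-- the initial five empty result lists, seen through the invariant
theorem pvInit_eq (cts : List (List Char)) :
    List.replicate cts.length ([] : List Char)
      = cts.map (fun t => (([] : List Int)).map (pvAt t)) := by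
  simp [List.map_const']

-- A's reversed-tail char list = B's rev (reverse, then take 8)
theorem pv_rev_eq (l : List Char) (h : 12 ≤ l.length) :
    (PySem.List.slice l (some (-8)) none).reverse = l.reverse.take 8 := by
  rw [PySem.List.slice_from_neg_ofNat l 8 (by omega)]
  rw [List.reverse_drop]
  congr 1
  omega

-- a list of length 8 is a literal 8-tuple of elements
theorem pv_list8 {α : Type} (l : List α) (h : l.length = 8) :
    ∃ a0 a1 a2 a3 a4 a5 a6 a7, l = [a0,a1,a2,a3,a4,a5,a6,a7] := by
  rcases l with _|⟨a0,l⟩; · simp at h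
  rcases l with _|⟨a1,l⟩; · simp at h
  rcases l with _|⟨a2,l⟩; · simp at h
  rcases l with _|⟨a3,l⟩; · simp at h
  rcases l with _|⟨a4,l⟩; · simp at h
  rcases l with _|⟨a5,l⟩; · simp at h
  rcases l with _|⟨a6,l⟩; · simp at h
  rcases l with _|⟨a7,l⟩; · simp at h
  rcases l with _|⟨a8,l⟩
  · exact ⟨a0,a1,a2,a3,a4,a5,a6,a7, rfl⟩
  · simp at h

-- on the destructured 8-char tail, A's per-k v15 list is B's zip of the mirrored halves
theorem pv_v15_eq (a0 a1 a2 a3 a4 a5 a6 a7 : Char) :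
    ((PySem.List.pyRange 0 8 1).map
        (pvV15A ([a0,a1,a2,a3,a4,a5,a6,a7].map (fun c => (c.toNat : Int)))))
      = (((PySem.List.slice [a0,a1,a2,a3,a4,a5,a6,a7] none (some 4)).zip
            ((PySem.List.slice? (PySem.List.slice [a0,a1,a2,a3,a4,a5,a6,a7] (some 4) none)
                none none (-1)).getD [])).map
          (fun ab => PySem.Int.band ((ab.1.toNat : Int)) ((ab.2.toNat : Int))))
        ++ (((PySem.List.slice [a0,a1,a2,a3,a4,a5,a6,a7] (some 4) none).zip
              (PySem.List.slice [a0,a1,a2,a3,a4,a5,a6,a7] none (some 4))).map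
            (fun ab => PySem.Int.bor ((ab.1.toNat : Int)) ((ab.2.toNat : Int)))) := by
  have hrange : PySem.List.pyRange 0 8 1 = [0,1,2,3,4,5,6,7] := by decide
  rw [hrange]
  simp [pvV15A, PySem.List.pyGet?, PySem.List.pyIdx?, PySem.List.slice,
    PySem.List.slice?_none_none_neg_one, PySem.List.clampIdx]

-- ===== VERDICT =====
set_option maxHeartbeats 1000000 in
theorem generate_a1_spec : Claim_equal_generate_a1 := by
  intro hex_str _
  unfold Spec_generate_a1 generate_a1 generate_a1_alt
  rw [pv_hexclean_eq]
  by_cases hlen : (pvHexClean hex_str).length < 12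
  · simp [hlen]
  · have h12 : 12 ≤ (pvHexClean hex_str).length := by omega
    have hrev? : (PySem.List.slice? (pvHexClean hex_str) none none (-1)).getD []
        = (pvHexClean hex_str).reverse := by
      rw [PySem.List.slice?_none_none_neg_one]; rfl
    have hslice8 : PySem.List.slice (pvHexClean hex_str).reverse none (some 8)
        = (pvHexClean hex_str).reverse.take 8 := by
      rw [PySem.List.slice_to _ (by norm_num)]; norm_num; rfl
    have hcodes : pvCodes (pvHexClean hex_str)
        = ((pvHexClean hex_str).reverse.take 8).map (fun c => (c.toNat : Int)) := by
      unfold pvCodes; rw [pv_rev_eq _ h12]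
    have hlen8 : ((pvHexClean hex_str).reverse.take 8).length = 8 := by
      rw [List.length_take, List.length_reverse]; omega
    obtain ⟨a0,a1,a2,a3,a4,a5,a6,a7, hrev8⟩ := pv_list8 _ hlen8
    simp only [hlen, if_false, hrev?, hslice8, hcodes, hrev8]
    have hseed : pvInitV10A ([a0,a1,a2,a3,a4,a5,a6,a7].map (fun c => (c.toNat : Int)))
        = pvSeed [a0,a1,a2,a3,a4,a5,a6,a7] 0 := by
      rw [pvInitV10A, pv_seed_eq]
    have hlenv : (([a0,a1,a2,a3,a4,a5,a6,a7].map (fun c => (c.toNat : Int))).length : Int) = 8 := by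
      simp
    rw [hseed, hlenv]
    rw [pvInit_eq pvCts]
    rw [pvFold_inv pvCts (pvV15A ([a0,a1,a2,a3,a4,a5,a6,a7].map (fun c => (c.toNat : Int))))
      (PySem.List.pyRange 0 8 1) (pvSeed [a0,a1,a2,a3,a4,a5,a6,a7] 0) []]
    have hfr := pv_fold_rec (pvV15A ([a0,a1,a2,a3,a4,a5,a6,a7].map (fun c => (c.toNat : Int))))
      8 0 (pvSeed [a0,a1,a2,a3,a4,a5,a6,a7] 0) []
    have h08 : (0 : Int) + ((8:Nat) : Int) = 8 := by norm_num
    rw [h08] at hfr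
    rw [hfr, pv_v15_eq]
    dsimp only
    simp only [pvCts, pvNotes, List.map_cons, List.map_nil, List.nil_append,
      List.zip_cons_cons, List.zip_nil_right, List.getD]
    simp
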